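-- pv_equiv track=rewrite | github.com/Anemistiras22/Spatial-Data | Assignment2_1.py | partition_entries
-- ===== SOURCE A (Python) =====
-- def partition_entries(entries, capacity, min_entries):
--     groups = []
--     i = 0
--     n = len(entries)
--
--     while i < n:
--         group = entries[i:i+capacity]
--         groups.append(group)
--         i += capacity
--
--     # if there is more than one group (not root) and the last group has less than the minimum number of entries (8) we adjust by moving elements from the previous group
--     if len(groups) > 1 and len(groups[-1]) < min_entries:
--
--         move_set = min_entries - len(groups[-1])
--
--         # move entries from second-to-last to the last
--         moved_entries = groups[-2][-move_set:]
--         groups[-2] = groups[-2][:-move_set]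
--
--         # add to the begining of the last group
--         groups[-1] = moved_entries + groups[-1]
--
--     return groups
-- ===== SOURCE B (Python) =====
-- def partition_entries(entries, capacity, min_entries):
--     n = len(entries)
--     if n == 0:
--         return []
--     num_groups = -(-n // capacity)  # ceil(n / capacity)
--     cuts = [j * capacity for j in range(num_groups)] + [n]
--     last_size = n - (num_groups - 1) * capacity
--     if num_groups > 1 and last_size < min_entries:
--         move_set = min_entries - last_size
--         cuts[num_groups - 1] = (num_groups - 2) * capacity + max(capacity - move_set, 0)
--     return [entries[cuts[j]:cuts[j + 1]] for j in range(num_groups)]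
-- ===== Notes on version B (the rewrite author's own statement) =====
-- stated objective: alternative
-- what changed: B computes the number of groups by ceiling division and a list of cut boundaries (adjusting the final interior boundary when the tail group is undersized), then slices entries between consecutive boundaries in one pass, instead of A's incremental while-loop that appends groups and then mutates the last two groups.
import Mathlib
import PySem

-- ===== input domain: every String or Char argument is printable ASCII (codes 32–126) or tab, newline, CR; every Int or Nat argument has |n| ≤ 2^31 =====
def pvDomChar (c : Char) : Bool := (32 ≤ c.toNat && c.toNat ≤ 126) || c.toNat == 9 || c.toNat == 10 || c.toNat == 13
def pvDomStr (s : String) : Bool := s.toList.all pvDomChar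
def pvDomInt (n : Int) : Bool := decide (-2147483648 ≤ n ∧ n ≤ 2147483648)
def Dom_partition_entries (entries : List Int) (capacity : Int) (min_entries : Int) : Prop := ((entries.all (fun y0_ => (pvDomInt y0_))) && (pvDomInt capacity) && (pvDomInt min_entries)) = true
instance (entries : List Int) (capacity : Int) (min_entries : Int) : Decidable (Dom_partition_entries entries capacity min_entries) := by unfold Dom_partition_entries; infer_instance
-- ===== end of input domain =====

-- B replaces A's incremental while-loop + in-place mutation of the last two groups by computing
-- all cut boundaries up front (ceiling division, one adjusted final boundary) and slicing entries
-- between consecutive boundaries in one pass; objective: alternative decomposition, same cost.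

-- ===== PORT A =====
-- while i < n: groups.append(entries[i:i+capacity]); i += capacity   (the fuel argument
-- len(entries)+1 is a totality guard only; it suffices whenever capacity ≥ 1, i.e. on all of Pre_)
def pvLoopA (entries : List Int) (capacity n : Int) : Nat → Int → List (List Int) → List (List Int)
  | 0, _, groups => groups
  | fuel + 1, i, groups =>
    if i < n then
      pvLoopA entries capacity n fuel (i + capacity)
        (groups ++ [PySem.List.slice entries (some i) (some (i + capacity))])
    else groups

def partition_entries (entries : List Int) (capacity : Int) (min_entries : Int) : List (List Int) :=
  let n : Int := entries.length
  let groups := pvLoopA entries capacity n (entries.length + 1) 0 []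
  if 1 < (groups.length : Int) ∧ ((PySem.List.pyGetD groups (-1) []).length : Int) < min_entries then
    let move_set : Int := min_entries - ((PySem.List.pyGetD groups (-1) []).length : Int)
    let moved_entries := PySem.List.slice (PySem.List.pyGetD groups (-2) []) (some (-move_set)) none
    let groups1 := PySem.List.pySetD groups (-2)
      (PySem.List.slice (PySem.List.pyGetD groups (-2) []) none (some (-move_set)))
    PySem.List.pySetD groups1 (-1) (moved_entries ++ PySem.List.pyGetD groups1 (-1) [])
  else groups

-- ===== PORT B =====
def partition_entries_alt (entries : List Int) (capacity : Int) (min_entries : Int) : List (List Int) :=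
  let n : Int := entries.length
  if n = 0 then []
  else
    let num_groups : Int := -(PySem.Int.floordiv (-n) capacity)
    let cuts := (PySem.List.pyRange 0 num_groups 1).map (fun j => j * capacity) ++ [n]
    let last_size : Int := n - (num_groups - 1) * capacity
    let cuts := if 1 < num_groups ∧ last_size < min_entries then
        PySem.List.pySetD cuts (num_groups - 1)
          ((num_groups - 2) * capacity + max (capacity - (min_entries - last_size)) 0)
      else cuts
    (PySem.List.pyRange 0 num_groups 1).map (fun j =>
      PySem.List.slice entries (some (PySem.List.pyGetD cuts j 0))
        (some (PySem.List.pyGetD cuts (j + 1) 0)))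

-- ===== PRECONDITION & SPEC =====
-- Pre_ excludes capacity ≤ 0 with nonempty entries: there A's while-loop never terminates
-- (no value is returned), and B raises ZeroDivisionError for capacity == 0.
def Pre_partition_entries (entries : List Int) (capacity : Int) (min_entries : Int) : Prop :=
  entries = [] ∨ 1 ≤ capacity
instance (entries : List Int) (capacity : Int) (min_entries : Int) : Decidable (Pre_partition_entries entries capacity min_entries) := by unfold Pre_partition_entries; infer_instance

def pvWitness_partition_entries : List Int × Int × Int := ([1, 2, 3, 4, 5], 2, 1)

def Spec_partition_entries (entries : List Int) (capacity : Int) (min_entries : Int) (out : List (List Int)) : Prop := out = partition_entries_alt entries capacity min_entries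
instance (entries : List Int) (capacity : Int) (min_entries : Int) (out : List (List Int)) : Decidable (Spec_partition_entries entries capacity min_entries out) := by unfold Spec_partition_entries; infer_instance

-- ===== CLAIM (what is proved, stated in full; the proofs are below) =====
def Claim_equal_partition_entries : Prop := ∀ (entries : List Int) (capacity : Int) (min_entries : Int), Dom_partition_entries entries capacity min_entries → Pre_partition_entries entries capacity min_entries → Spec_partition_entries entries capacity min_entries (partition_entries entries capacity min_entries)

-- ===== LEMMAS AND PROOFS =====

def pvChunk (c : Nat) (l : List Int) : List (List Int) :=
  if _h : l = [] ∨ c = 0 then [] else l.take c :: pvChunk c (l.drop c)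
termination_by l.length
decreasing_by
  simp only [List.length_drop]
  have hl : l ≠ [] := fun he => _h (Or.inl he)
  have : 0 < l.length := List.length_pos_iff.mpr hl
  have : c ≠ 0 := fun he => _h (Or.inr he)
  omega

theorem pvChunk_nil (c : Nat) : pvChunk c [] = [] := by unfold pvChunk; simp

theorem pvChunk_cons (c : Nat) (l : List Int) (hl : l ≠ []) (hc : c ≠ 0) :
    pvChunk c l = l.take c :: pvChunk c (l.drop c) := by
  rw [pvChunk]; simp [hl, hc]

theorem pvLoopA_eq (entries : List Int) (c : Nat) (hc : 1 ≤ c) :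
    ∀ (fuel k : Nat) (acc : List (List Int)), entries.length - k ≤ fuel →
      pvLoopA entries (c : Int) (entries.length : Int) fuel (k : Int) acc
        = acc ++ pvChunk c (entries.drop k) := by
  intro fuel
  induction fuel with
  | zero =>
    intro k acc h
    have hk : entries.length ≤ k := by omega
    rw [List.drop_of_length_le hk, pvChunk_nil]
    simp [pvLoopA]
  | succ fuel ih =>
    intro k acc h
    rw [pvLoopA]
    by_cases hk : k < entries.length
    · rw [if_pos (by exact_mod_cast hk)]
      have hcast : (k : Int) + (c : Int) = ((k + c : Nat) : Int) := by push_cast; ring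
      rw [PySem.List.slice_natCast_add, hcast, ih (k + c) _ (by omega)]
      rw [pvChunk_cons c (entries.drop k) (by simp; omega) (by omega)]
      simp [List.drop_drop, Nat.add_comm]
    · rw [if_neg (by exact_mod_cast hk)]
      rw [List.drop_of_length_le (by omega), pvChunk_nil]
      simp

theorem pvG_succ (c n : Nat) (hc : 1 ≤ c) (hn : 1 ≤ n) :
    (n + c - 1) / c = ((n - c) + c - 1) / c + 1 := by
  by_cases h : n ≤ c
  · have e1 : n + c - 1 = (n - 1) + c := by omega
    have e2 : n - c = 0 := by omega
    rw [e1, e2, Nat.add_div_right _ (by omega), Nat.div_eq_of_lt (by omega)]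
    simp [Nat.div_eq_of_lt (show c - 1 < c by omega)]
  · have h' : c < n := by omega
    have e1 : n + c - 1 = ((n - c) + c - 1) + c := by omega
    rw [e1, Nat.add_div_right _ (by omega)]

theorem pvChunk_eq_map (c : Nat) (hc : 1 ≤ c) (l : List Int) :
    pvChunk c l = (List.range ((l.length + c - 1) / c)).map
      (fun j => (l.drop (j * c)).take c) := by
  by_cases hl : l = []
  · subst hl; simp [pvChunk_nil, Nat.div_eq_of_lt (show c - 1 < c by omega)]
  · have hn : 1 ≤ l.length := by
      have := List.length_pos_iff.mpr hl; omega
    rw [pvChunk_cons c l hl (by omega), pvG_succ c l.length hc hn]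
    have hlen : (l.drop c).length = l.length - c := by simp
    rw [List.range_succ_eq_map, List.map_cons, List.map_map]
    have ih := pvChunk_eq_map c hc (l.drop c)
    rw [hlen] at ih
    rw [ih]
    simp only [List.drop_zero, Nat.zero_mul]
    congr 1
    apply List.map_congr_left
    intro j hj
    simp only [Function.comp_apply]
    rw [List.drop_drop]
    congr 2
    rw [Nat.succ_mul]
    omega
termination_by l.length
decreasing_by
  simp only [List.length_drop]
  have := List.length_pos_iff.mpr hl
  omega

theorem pvSetD_neg {α : Type} (xs : List α) (i : Int) (v : α) (h1 : i < 0) (h2 : 0 ≤ (xs.length : Int) + i) :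
    PySem.List.pySetD xs i v = xs.set ((xs.length : Int) + i).toNat v := by
  simp only [PySem.List.pySetD, PySem.List.pySet?, PySem.List.pyIdx?]
  rw [if_neg (by omega), if_pos (by omega)]
  simp only [Option.map_some, Option.getD_some]
  congr 1
  omega

def pvF (entries : List Int) (c' j : Nat) : List Int := (entries.drop (j * c')).take c'

def pvG (N c' : Nat) : Nat := (N + c' - 1) / c'

def pvR (N c' : Nat) : Nat := N - (pvG N c' - 1) * c'

def pvPlain (entries : List Int) (c' G : Nat) : List (List Int) := (List.range G).map (pvF entries c')

def pvAdj (entries : List Int) (c' m' G : Nat) : List (List Int) :=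
  (List.range G).map (fun k =>
    if k = G - 1 then (pvF entries c' (G - 2)).drop (c' - m') ++ pvF entries c' (G - 1)
    else if k = G - 2 then (pvF entries c' (G - 2)).take (c' - m')
    else pvF entries c' k)

theorem pvG_facts (N c' : Nat) (hc' : 1 ≤ c') (hN : 1 ≤ N) :
    1 ≤ pvG N c' ∧ N ≤ pvG N c' * c' ∧ pvG N c' * c' ≤ N + c' - 1 ∧
      (pvG N c' - 1) * c' + c' = pvG N c' * c' := by
  have h1 : 1 ≤ pvG N c' := by
    rw [pvG, Nat.le_div_iff_mul_le (by omega)]; omega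
  have h3 : pvG N c' * c' ≤ N + c' - 1 := Nat.div_mul_le_self _ _
  have h4 : (pvG N c' - 1) * c' + c' = pvG N c' * c' := by
    have h : pvG N c' - 1 + 1 = pvG N c' := by omega
    calc (pvG N c' - 1) * c' + c' = (pvG N c' - 1 + 1) * c' := by rw [Nat.succ_mul]
    _ = _ := by rw [h]
  have h2 : N ≤ pvG N c' * c' := by
    have hd := Nat.div_add_mod (N + c' - 1) c'
    have hm : (N + c' - 1) % c' < c' := Nat.mod_lt _ (by omega)
    have hcomm : c' * ((N + c' - 1) / c') = ((N + c' - 1) / c') * c' := Nat.mul_comm _ _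
    rw [pvG]
    omega
  exact ⟨h1, h2, h3, h4⟩

theorem pvAdj_eq_set (entries : List Int) (c' m' G : Nat) (hG2 : 2 ≤ G) :
    (((List.range G).map (pvF entries c')).set (G - 2) ((pvF entries c' (G - 2)).take (c' - m'))).set
        (G - 1) ((pvF entries c' (G - 2)).drop (c' - m') ++ pvF entries c' (G - 1))
      = pvAdj entries c' m' G := by
  apply List.ext_getElem
  · simp [pvAdj]
  intro k h1 h2
  simp only [pvAdj, List.length_set, List.length_map, List.length_range] at h1 h2 ⊢
  rw [List.getElem_set, List.getElem_set, List.getElem_map, List.getElem_map, List.getElem_range]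
  by_cases hk1 : k = G - 1
  · rw [if_pos (by omega : G - 1 = k), if_pos hk1]
  · by_cases hk2 : k = G - 2
    · rw [if_neg (by omega : ¬ G - 1 = k), if_pos (by omega : G - 2 = k),
        if_neg hk1, if_pos hk2]
    · rw [if_neg (by omega : ¬ G - 1 = k), if_neg (by omega : ¬ G - 2 = k),
        if_neg hk1, if_neg hk2]

theorem pvA_eq (entries : List Int) (c' : Nat) (m : Int) (hc' : 1 ≤ c') (hN : 1 ≤ entries.length) :
    partition_entries entries (c' : Int) m =
      if 2 ≤ pvG entries.length c' ∧ ((pvR entries.length c' : Nat) : Int) < m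
      then pvAdj entries c' ((m - (pvR entries.length c' : Int)).toNat) (pvG entries.length c')
      else pvPlain entries c' (pvG entries.length c') := by
  obtain ⟨hG1, hP1, hP2, hGc⟩ := pvG_facts entries.length c' hc' hN
  have hA0 : pvLoopA entries (c' : Int) (entries.length : Int) (entries.length + 1) 0 []
      = (List.range (pvG entries.length c')).map (pvF entries c') := by
    have h := pvLoopA_eq entries c' hc' (entries.length + 1) 0 [] (by omega)
    simpa [pvChunk_eq_map c' hc' entries, pvG, pvF] using h
  simp only [partition_entries]
  rw [hA0]
  set G := pvG entries.length c' with hGdef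
  set N := entries.length with hNdef
  have hrdef : pvR N c' = N - (G - 1) * c' := rfl
  have hmaplen : ((List.range G).map (pvF entries c')).length = G := by simp
  rw [PySem.List.pyGetD_neg_ofNat _ 1 [] (by omega) (by rw [hmaplen]; omega)]
  simp only [List.length_map, List.length_range, List.getElem_map, List.getElem_range]
  have hflast : (pvF entries c' (G - 1)).length = pvR N c' := by
    simp [pvF, hrdef, ← hNdef]; omega
  simp only [hflast]
  by_cases hc2 : 2 ≤ G ∧ ((pvR N c' : Nat) : Int) < m
  · obtain ⟨hG2, hm⟩ := hc2
    rw [if_pos ⟨by omega, hm⟩, if_pos ⟨hG2, hm⟩]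
    have hm'pos : 0 < (m - ((pvR N c' : Nat) : Int)).toNat := by omega
    have hms : m - ((pvR N c' : Nat) : Int) = (((m - ((pvR N c' : Nat) : Int)).toNat : Nat) : Int) := by omega
    set m' := (m - ((pvR N c' : Nat) : Int)).toNat with hm'def
    rw [hms]
    rw [PySem.List.pyGetD_neg_ofNat _ 2 [] (by omega) (by rw [hmaplen]; omega)]
    simp only [List.length_map, List.length_range, List.getElem_map, List.getElem_range]
    rw [PySem.List.slice_to_neg_natCast _ _ hm'pos, PySem.List.slice_from_neg_natCast _ _ hm'pos]
    have hfpen : (pvF entries c' (G - 2)).length = c' := by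
      have hGc2 : (G - 2) * c' + c' = (G - 1) * c' := by
        have h : G - 2 + 1 = G - 1 := by omega
        calc (G - 2) * c' + c' = (G - 2 + 1) * c' := by rw [Nat.succ_mul]
        _ = _ := by rw [h]
      simp [pvF, ← hNdef]; omega
    rw [hfpen]
    rw [pvSetD_neg _ (-2) _ (by omega) (by rw [hmaplen]; omega)]
    rw [pvSetD_neg _ (-1) _ (by omega) (by simp only [List.length_set, hmaplen]; omega)]
    rw [PySem.List.pyGetD_neg_ofNat _ 1 [] (by omega)
      (by simp only [List.length_set, hmaplen]; omega)]
    simp only [List.length_set, hmaplen]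
    have hi2 : ((G : Int) + -2).toNat = G - 2 := by omega
    have hi1 : ((G : Int) + -1).toNat = G - 1 := by omega
    simp only [hi2, hi1]
    rw [List.getElem_set_ne (by omega)]
    simp only [List.getElem_map, List.getElem_range]
    exact pvAdj_eq_set entries c' m' G hG2
  · rw [if_neg (by omega), if_neg hc2]
    rfl

theorem pvB_eq (entries : List Int) (c' : Nat) (m : Int) (hc' : 1 ≤ c') (hN : 1 ≤ entries.length) :
    partition_entries_alt entries (c' : Int) m =
      if 2 ≤ pvG entries.length c' ∧ ((pvR entries.length c' : Nat) : Int) < m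
      then pvAdj entries c' ((m - (pvR entries.length c' : Int)).toNat) (pvG entries.length c')
      else pvPlain entries c' (pvG entries.length c') := by
  obtain ⟨hG1, hP1, hP2, hGc⟩ := pvG_facts entries.length c' hc' hN
  simp only [partition_entries_alt]
  rw [if_neg (by omega)]
  set G := pvG entries.length c' with hGdef
  set N := entries.length with hNdef
  have hrdef : pvR N c' = N - (G - 1) * c' := rfl
  have hng : -(PySem.Int.floordiv (-(N : Int)) (c' : Int)) = (G : Int) := by
    rw [PySem.Int.neg_floordiv_neg_eq_iff_of_pos (by omega : (0:Int) < (c' : Int))]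
    constructor
    · have h : ((G : Int) - 1) * (c' : Int) = (((G - 1) * c' : Nat) : Int) := by
        push_cast [Nat.cast_sub hG1]; ring
      rw [h]; exact_mod_cast (by omega : (G - 1) * c' < N)
    · exact_mod_cast hP1
  rw [hng]
  have hls : (N : Int) - ((G : Int) - 1) * (c' : Int) = ((pvR N c' : Nat) : Int) := by
    have h : ((G : Int) - 1) * (c' : Int) = (((G - 1) * c' : Nat) : Int) := by
      push_cast [Nat.cast_sub hG1]; ring
    rw [h, hrdef]; push_cast [Nat.cast_sub (by omega : (G - 1) * c' ≤ N)]; ring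
  rw [hls]
  have hrange : PySem.List.pyRange 0 (G : Int) 1 = (List.range G).map (fun k : Nat => (k : Int)) := by
    rw [PySem.List.pyRange_one]; simp
  rw [hrange]
  simp only [List.map_map, Function.comp_def]
  have hcutU : ∀ j : Nat, j ≤ G →
      PySem.List.pyGetD ((List.range G).map (fun k : Nat => ((k : Int) * (c' : Int))) ++ [(N : Int)]) (j : Int) 0
        = if j < G then (((j * c' : Nat) : Nat) : Int) else (N : Int) := by
    intro j hj
    rw [PySem.List.pyGetD_natCast]
    by_cases h : j < G
    · rw [List.getD_append _ _ _ _ (by simp; omega), if_pos h,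
        List.getD_eq_getElem _ _ (by simp; omega)]
      simp
    · rw [List.getD_append_right _ _ _ _ (by simp; omega), if_neg h]
      have he : j - ((List.range G).map (fun k : Nat => ((k : Int) * (c' : Int)))).length = 0 := by
        simp; omega
      rw [he]
      simp
  by_cases hc2 : 2 ≤ G ∧ ((pvR N c' : Nat) : Int) < m
  · obtain ⟨hG2, hm⟩ := hc2
    simp only [if_pos (show (1:Int) < (G:Int) ∧ ((pvR N c' : Nat) : Int) < m from ⟨by omega, hm⟩),
      if_pos (show 2 ≤ G ∧ ((pvR N c' : Nat) : Int) < m from ⟨hG2, hm⟩)]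
    set m' := (m - ((pvR N c' : Nat) : Int)).toNat with hm'def
    have hm'pos : 0 < m' := by omega
    have hms : m - ((pvR N c' : Nat) : Int) = (m' : Int) := by omega
    have hone : ((G : Int) - 1) = ((G - 1 : Nat) : Int) := by omega
    have hGc2 : (G - 2) * c' + c' = (G - 1) * c' := by
      have h : G - 2 + 1 = G - 1 := by omega
      calc (G - 2) * c' + c' = (G - 2 + 1) * c' := by rw [Nat.succ_mul]
      _ = _ := by rw [h]
    have hv : ((G : Int) - 2) * (c' : Int) + max ((c' : Int) - (m - ((pvR N c' : Nat) : Int))) 0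
        = (((G - 2) * c' + (c' - m') : Nat) : Int) := by
      rw [hms]
      rcases Nat.le_total m' c' with h | h
      · rw [max_eq_left (by omega)]
        push_cast [Nat.cast_sub h, Nat.cast_sub (show 2 ≤ G from hG2)]
        ring
      · rw [max_eq_right (by omega)]
        have h0 : c' - m' = 0 := by omega
        rw [h0]
        push_cast [Nat.cast_sub hG2]
        ring
    simp only [hv, hone, PySem.List.pySetD_natCast]
    have hcutA : ∀ j : Nat, j ≤ G →
        PySem.List.pyGetD (((List.range G).map (fun k : Nat => ((k : Int) * (c' : Int))) ++ [(N : Int)]).set (G - 1) (((G - 2) * c' + (c' - m') : Nat) : Int)) (j : Int) 0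
          = if j = G - 1 then (((G - 2) * c' + (c' - m') : Nat) : Int)
            else if j < G then ((j * c' : Nat) : Int) else (N : Int) := by
      intro j hj
      rw [PySem.List.pyGetD_natCast, List.getD_eq_getElem _ _ (by simp; omega), List.getElem_set]
      by_cases h : G - 1 = j
      · rw [if_pos h, if_pos h.symm]
      · rw [if_neg h, if_neg (fun hh => h hh.symm)]
        have hu := hcutU j hj
        rw [PySem.List.pyGetD_natCast, List.getD_eq_getElem _ _ (by simp; omega)] at hu
        exact hu
    simp only [pvAdj]
    apply List.map_congr_left
    intro k hk
    have hkG : k < G := List.mem_range.mp hk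
    have hsucc : ((k : Int) + 1) = ((k + 1 : Nat) : Int) := by push_cast; ring
    rw [hsucc, hcutA k (by omega), hcutA (k + 1) (by omega)]
    by_cases hk1 : k = G - 1
    · rw [if_pos hk1, if_neg (by omega : ¬ k + 1 = G - 1), if_neg (by omega : ¬ k + 1 < G),
        if_pos hk1, PySem.List.slice_natCast]
      subst hk1
      have hstep1 : (pvF entries c' (G - 2)).drop (c' - m')
          = (entries.drop ((G - 2) * c' + (c' - m'))).take (c' - (c' - m')) := by
        rw [pvF, List.drop_take, List.drop_drop]
      have hstep2 : pvF entries c' (G - 1)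
          = (entries.drop ((G - 2) * c' + (c' - m'))).drop (c' - (c' - m')) := by
        rw [pvF, List.drop_drop]
        have hidx : (G - 1) * c' = (G - 2) * c' + (c' - m') + (c' - (c' - m')) := by omega
        rw [← hidx]
        apply List.take_of_length_le
        simp [← hNdef]
        omega
      rw [hstep1, hstep2, List.take_append_drop, List.take_of_length_le (by simp [← hNdef])]
    · by_cases hk2 : k = G - 2
      · rw [if_neg hk1, if_pos hkG, if_pos (by omega : k + 1 = G - 1),
          if_neg hk1, if_pos hk2, PySem.List.slice_natCast]
        subst hk2
        have he : (G - 2) * c' + (c' - m') - (G - 2) * c' = c' - m' := by omega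
        rw [he, pvF, List.take_take, min_eq_left (by omega : c' - m' ≤ c')]
      · rw [if_neg hk1, if_pos hkG, if_neg (by omega : ¬ k + 1 = G - 1),
          if_pos (by omega : k + 1 < G), if_neg hk1, if_neg hk2, PySem.List.slice_natCast]
        have he : (k + 1) * c' - k * c' = c' := by rw [Nat.succ_mul]; omega
        rw [he]
        rfl
  · simp only [if_neg (show ¬((1:Int) < (G:Int) ∧ ((pvR N c' : Nat) : Int) < m) by omega),
      if_neg hc2]
    simp only [pvPlain]
    apply List.map_congr_left
    intro k hk
    have hkG : k < G := List.mem_range.mp hk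
    have hsucc : ((k : Int) + 1) = ((k + 1 : Nat) : Int) := by push_cast; ring
    rw [hsucc, hcutU k (by omega), hcutU (k + 1) (by omega), if_pos hkG]
    by_cases hlast : k + 1 < G
    · rw [if_pos hlast, PySem.List.slice_natCast]
      have he : (k + 1) * c' - k * c' = c' := by rw [Nat.succ_mul]; omega
      rw [he]; rfl
    · rw [if_neg hlast]
      have hkeq : k = G - 1 := by omega
      subst hkeq
      rw [PySem.List.slice_natCast]
      have hlen : (entries.drop ((G - 1) * c')).length = pvR N c' := by
        simp [← hNdef, hrdef]
      rw [pvF]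
      rw [List.take_of_length_le (by omega), List.take_of_length_le (by omega)]

theorem pv_empty (capacity min_entries : Int) :
    partition_entries [] capacity min_entries = partition_entries_alt [] capacity min_entries := by
  simp [partition_entries, partition_entries_alt, pvLoopA]

theorem pv_main2 : ∀ (entries : List Int) (capacity min_entries : Int),
    Pre_partition_entries entries capacity min_entries →
    partition_entries entries capacity min_entries = partition_entries_alt entries capacity min_entries := by
  intro entries capacity min_entries hpre
  by_cases he : entries = []
  · subst he; exact pv_empty capacity min_entries
  · have hc1 : 1 ≤ capacity := hpre.resolve_left he
    have hcap : capacity = ((capacity.toNat : Nat) : Int) := by omega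
    have hc' : 1 ≤ capacity.toNat := by omega
    have hN : 1 ≤ entries.length := by
      have := List.length_pos_iff.mpr he; omega
    rw [hcap, pvA_eq entries capacity.toNat min_entries hc' hN,
      pvB_eq entries capacity.toNat min_entries hc' hN]

-- ===== VERDICT (by name: the statement is the Claim_ definition above) =====
theorem partition_entries_spec : Claim_equal_partition_entries := by
  intro entries capacity min_entries _ hpre
  unfold Spec_partition_entries
  exact pv_main2 entries capacity min_entries hpre
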